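-- pv_equiv track=rewrite | github.com/regolet/pisowifi | app/services/update_service.py | _is_newer_version
-- ===== SOURCE A (Python) =====
-- def _is_newer_version(version1, version2):
--     """Compare version strings"""
--     try:
--         # Simple version comparison - can be enhanced for semantic versioning
--         v1_parts = [int(x) for x in version1.split('.')]
--         v2_parts = [int(x) for x in version2.split('.')]
--
--         # Pad shorter version with zeros
--         max_len = max(len(v1_parts), len(v2_parts))
--         v1_parts.extend([0] * (max_len - len(v1_parts)))
--         v2_parts.extend([0] * (max_len - len(v2_parts)))
--
--         return v1_parts > v2_parts
--     except ValueError: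
--         # Fallback to string comparison
--         return version1 > version2
-- ===== SOURCE B (Python) =====
-- def _is_newer_version(version1, version2):
--     """Compare version strings"""
--     try:
--         # Parse both fully first, so the string fallback fires exactly as in A
--         v1_parts = [int(x) for x in version1.split('.')]
--         v2_parts = [int(x) for x in version2.split('.')]
--     except ValueError:
--         return version1 > version2
--     return _first_diff_gt(v1_parts, v2_parts)
--
--
-- def _first_diff_gt(v1, v2):
--     """Recursive first-difference scan, missing components read as 0."""
--     if not v1 and not v2:
--         return False
--     a = v1[0] if v1 else 0
--     b = v2[0] if v2 else 0
--     if a != b: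
--         return a > b
--     return _first_diff_gt(v1[1:], v2[1:])
-- ===== Notes on version B (the rewrite author's own statement) =====
-- stated objective: alternative
-- what changed: Replaces A's pad-both-lists-with-zeros-then-builtin-list-'>' comparison by a recursive first-difference scan that treats a missing component as 0 and needs no padding or length arithmetic; parsing and the ValueError string fallback are unchanged.
import Mathlib
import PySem

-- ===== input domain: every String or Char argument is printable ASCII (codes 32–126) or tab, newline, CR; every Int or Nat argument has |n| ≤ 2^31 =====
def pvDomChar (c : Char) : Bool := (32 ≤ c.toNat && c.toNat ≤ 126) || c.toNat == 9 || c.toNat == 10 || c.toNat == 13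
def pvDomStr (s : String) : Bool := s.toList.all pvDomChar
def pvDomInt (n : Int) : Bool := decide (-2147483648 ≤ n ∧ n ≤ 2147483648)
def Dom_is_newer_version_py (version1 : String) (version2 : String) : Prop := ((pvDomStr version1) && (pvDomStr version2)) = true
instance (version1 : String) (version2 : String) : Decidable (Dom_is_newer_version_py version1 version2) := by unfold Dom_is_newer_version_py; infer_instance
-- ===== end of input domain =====

-- B replaces A's pad-with-zeros-then-builtin-list-'>' comparison by a recursive
-- first-difference scan (missing component = 0); parsing and the fallback are unchanged.

-- ===== PORT A =====
-- [int(x) for x in s.split('.')] — ValueError (= none from ofStr?) makes the whole list none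
def pvParseParts (parts : List (List Char)) : Option (List Int) :=
  parts.mapM PySem.Int.ofChars?

-- Python's '>' on two int lists (no PySem primitive): elementwise, first difference
-- decides, else the longer list is greater — exact for lists of ints.
def pyListGtInt : List Int → List Int → Bool
  | _ :: _, [] => true
  | [], _ => false
  | a :: as, b :: bs => if a = b then pyListGtInt as bs else decide (b < a)

def is_newer_version_py (version1 : String) (version2 : String) : Bool :=
  match pvParseParts (PySem.Chars.splitOn version1.toList ['.']) with
  | none => PySem.Chars.strLt version2.toList version1.toList  -- version1 > version2
  | some v1 =>
    match pvParseParts (PySem.Chars.splitOn version2.toList ['.']) with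
    | none => PySem.Chars.strLt version2.toList version1.toList
    | some v2 =>
      let maxLen := max v1.length v2.length
      pyListGtInt (v1 ++ List.replicate (maxLen - v1.length) 0)
                  (v2 ++ List.replicate (maxLen - v2.length) 0)

-- ===== PORT B =====
-- _first_diff_gt from Source B: recursive scan, v[0] read as 0 when the list is empty
def pvFirstDiffGt : List Int → List Int → Bool
  | [], [] => false
  | [], b :: bs => if (0 : Int) = b then pvFirstDiffGt [] bs else decide (b < 0)
  | a :: as, [] => if a = (0 : Int) then pvFirstDiffGt as [] else decide (0 < a)
  | a :: as, b :: bs => if a = b then pvFirstDiffGt as bs else decide (b < a)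

def is_newer_version_py_alt (version1 : String) (version2 : String) : Bool :=
  match pvParseParts (PySem.Chars.splitOn version1.toList ['.']) with
  | none => PySem.Chars.strLt version2.toList version1.toList
  | some v1 =>
    match pvParseParts (PySem.Chars.splitOn version2.toList ['.']) with
    | none => PySem.Chars.strLt version2.toList version1.toList
    | some v2 => pvFirstDiffGt v1 v2

-- ===== PRECONDITION & SPEC =====
def Spec_is_newer_version_py (version1 : String) (version2 : String) (out : Bool) : Prop := out = is_newer_version_py_alt version1 version2
instance (version1 : String) (version2 : String) (out : Bool) : Decidable (Spec_is_newer_version_py version1 version2 out) := by unfold Spec_is_newer_version_py; infer_instance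

-- ===== CLAIM (what is proved, stated in full; the proofs are below) =====
def Claim_equal_is_newer_version_py : Prop := ∀ (version1 : String) (version2 : String), Dom_is_newer_version_py version1 version2 → Spec_is_newer_version_py version1 version2 (is_newer_version_py version1 version2)

-- ===== LEMMAS AND PROOFS =====

lemma pyListGtInt_replicate_left (ys : List Int) :
    pyListGtInt (List.replicate ys.length 0) ys = pvFirstDiffGt [] ys := by
  induction ys with
  | nil => simp [pyListGtInt, pvFirstDiffGt]
  | cons b bs ih =>
      simp only [List.length_cons, List.replicate_succ, pyListGtInt, pvFirstDiffGt]
      rw [ih]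

lemma pyListGtInt_replicate_right (xs : List Int) :
    pyListGtInt xs (List.replicate xs.length 0) = pvFirstDiffGt xs [] := by
  induction xs with
  | nil => simp [pyListGtInt, pvFirstDiffGt]
  | cons a as ih =>
      simp only [List.length_cons, List.replicate_succ, pyListGtInt, pvFirstDiffGt]
      rw [ih]

lemma pad_compare_eq_firstDiff (xs ys : List Int) :
    pyListGtInt (xs ++ List.replicate (max xs.length ys.length - xs.length) 0)
                (ys ++ List.replicate (max xs.length ys.length - ys.length) 0)
      = pvFirstDiffGt xs ys := by
  induction xs generalizing ys with
  | nil =>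
      simp only [List.length_nil, List.nil_append, Nat.sub_self,
        List.replicate_zero, List.append_nil, Nat.sub_zero, Nat.max_eq_right (Nat.zero_le _)]
      exact pyListGtInt_replicate_left ys
  | cons a as ih =>
      cases ys with
      | nil =>
          simp only [List.length_nil, List.append_nil, Nat.sub_self, List.replicate_zero,
            Nat.sub_zero, Nat.max_eq_left (Nat.zero_le _)]
          exact pyListGtInt_replicate_right (a :: as)
      | cons b bs =>
          have hmax : max (a :: as).length (b :: bs).length - (a :: as).length
              = max as.length bs.length - as.length := by
            simp [List.length_cons, Nat.succ_max_succ]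
          have hmax' : max (a :: as).length (b :: bs).length - (b :: bs).length
              = max as.length bs.length - bs.length := by
            simp [List.length_cons, Nat.succ_max_succ]
          rw [hmax, hmax']
          simp only [List.cons_append, pyListGtInt, pvFirstDiffGt]
          by_cases h : a = b
          · simp [h, ih bs]
          · simp [h]

-- ===== VERDICT (by name: the statement is the Claim_ definition above) =====
theorem is_newer_version_py_spec : Claim_equal_is_newer_version_py := by
  intro version1 version2 _
  unfold Spec_is_newer_version_py is_newer_version_py is_newer_version_py_alt
  rcases h1 : pvParseParts (PySem.Chars.splitOn version1.toList ['.']) with _ | v1 <;>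
    rcases h2 : pvParseParts (PySem.Chars.splitOn version2.toList ['.']) with _ | v2 <;>
      simp only [h1, h2]
  exact pad_compare_eq_firstDiff v1 v2
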